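-- pv_equiv track=rewrite | github.com/covagashi/LazyScriptingEplan | src/agents/validation_agent.py | _check_balanced_braces
-- ===== SOURCE A (Python) =====
-- def _check_balanced_braces(script: str) -> bool:
--     """Check for balanced braces"""
--     count = 0
--     in_string = False
--     in_comment = False
--
--     i = 0
--     while i < len(script):
--         char = script[i]
--
--         # Handle string literals
--         if char == '"' and not in_comment:
--             if i == 0 or script[i-1] != '\\':
--                 in_string = not in_string
--
--         # Handle comments
--         elif char == '/' and i + 1 < len(script) and not in_string:
--             if script[i + 1] == '/':
--                 in_comment = True
--             elif script[i + 1] == '*':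
--                 # Multi-line comment start
--                 i += 1
--
--         elif char == '\n':
--             in_comment = False
--
--         # Count braces
--         elif not in_string and not in_comment:
--             if char == '{':
--                 count += 1
--             elif char == '}':
--                 count -= 1
--                 if count < 0:
--                     return False
--
--         i += 1
--
--     return count == 0
-- ===== SOURCE B (Python) =====
-- def _lex_braces(script):
--     """Pass 1: lexer with a single mode enum; emits the braces seen in code mode."""
--     CODE, STR, COMMENT = 0, 1, 2
--     mode = CODE
--     out = []
--     i = 0
--     n = len(script)
--     while i < n:
--         ch = script[i]
--         if ch == '"' and mode != COMMENT:
--             if i == 0 or script[i - 1] != '\\':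
--                 mode = STR if mode == CODE else CODE
--         elif ch == '/' and i + 1 < n and mode != STR:
--             if script[i + 1] == '/':
--                 mode = COMMENT
--             elif script[i + 1] == '*':
--                 i += 1
--         elif ch == '\n':
--             if mode == COMMENT:
--                 mode = CODE
--         elif mode == CODE and (ch == '{' or ch == '}'):
--             out.append(ch)
--         i += 1
--     return out
--
--
-- def _check_balanced_braces(script: str) -> bool:
--     """Pass 2: balance-check the brace token stream."""
--     depth = 0
--     for b in _lex_braces(script):
--         depth += 1 if b == '{' else -1
--         if depth < 0:
--             return False
--     return depth == 0
-- ===== Notes on version B (the rewrite author's own statement) =====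
-- stated objective: alternative
-- what changed: A's single loop that counts braces inline is split into two passes: a lexer (single mode enum instead of two boolean flags) that emits the brace tokens seen outside strings/comments, and a separate balance check over that token stream.
import Mathlib
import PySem

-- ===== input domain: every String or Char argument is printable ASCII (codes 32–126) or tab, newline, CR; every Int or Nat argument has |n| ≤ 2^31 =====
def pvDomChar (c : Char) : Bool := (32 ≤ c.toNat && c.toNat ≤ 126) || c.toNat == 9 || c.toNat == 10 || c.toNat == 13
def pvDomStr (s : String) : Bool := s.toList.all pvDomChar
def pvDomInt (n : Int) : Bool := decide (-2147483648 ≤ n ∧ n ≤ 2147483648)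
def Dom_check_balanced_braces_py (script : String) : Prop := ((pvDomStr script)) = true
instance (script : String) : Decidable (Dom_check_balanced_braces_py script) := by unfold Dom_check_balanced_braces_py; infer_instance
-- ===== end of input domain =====

-- B splits A's single counting loop into two passes: a lexer that emits the brace
-- tokens seen outside strings/comments, then a separate balance check of that token
-- stream (objective: alternative decomposition, same cost).

-- ===== PORT A =====
-- the while loop of A: index i, brace counter, two boolean flags
def aLoop (c : List Char) (i : Nat) (count : Int) (in_string in_comment : Bool) : Bool :=
  if h : i < c.length then
    if c.getD i ' ' == '"' && !in_comment then
      if i == 0 || c.getD (i-1) ' ' != '\\' then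
        aLoop c (i+1) count (!in_string) in_comment
      else aLoop c (i+1) count in_string in_comment
    else if c.getD i ' ' == '/' && decide (i + 1 < c.length) && !in_string then
      if c.getD (i+1) ' ' == '/' then aLoop c (i+1) count in_string true
      else if c.getD (i+1) ' ' == '*' then aLoop c (i+2) count in_string in_comment
      else aLoop c (i+1) count in_string in_comment
    else if c.getD i ' ' == '\n' then aLoop c (i+1) count in_string false
    else if !in_string && !in_comment then
      if c.getD i ' ' == '{' then aLoop c (i+1) (count+1) in_string in_comment
      else if c.getD i ' ' == '}' then
        if count - 1 < 0 then false
        else aLoop c (i+1) (count-1) in_string in_comment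
      else aLoop c (i+1) count in_string in_comment
    else aLoop c (i+1) count in_string in_comment
  else count == 0
termination_by c.length - i
decreasing_by all_goals omega

def check_balanced_braces_py (script : String) : Bool :=
  aLoop script.toList 0 0 false false

-- ===== PORT B =====
inductive LexMode
  | code
  | strMode
  | comment
deriving DecidableEq

-- pass 1 of B: lexer with a single mode, emits the active brace characters
def lexLoop (c : List Char) (i : Nat) (mode : LexMode) (out : List Char) : List Char :=
  if h : i < c.length then
    if c.getD i ' ' == '"' && !(mode == LexMode.comment) then
      if i == 0 || c.getD (i-1) ' ' != '\\' then
        lexLoop c (i+1) (if mode == LexMode.code then LexMode.strMode else LexMode.code) out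
      else lexLoop c (i+1) mode out
    else if c.getD i ' ' == '/' && decide (i + 1 < c.length) && !(mode == LexMode.strMode) then
      if c.getD (i+1) ' ' == '/' then lexLoop c (i+1) LexMode.comment out
      else if c.getD (i+1) ' ' == '*' then lexLoop c (i+2) mode out
      else lexLoop c (i+1) mode out
    else if c.getD i ' ' == '\n' then
      lexLoop c (i+1) (if mode == LexMode.comment then LexMode.code else mode) out
    else if mode == LexMode.code && (c.getD i ' ' == '{' || c.getD i ' ' == '}') then
      lexLoop c (i+1) mode (out ++ [c.getD i ' '])
    else lexLoop c (i+1) mode out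
  else out
termination_by c.length - i
decreasing_by all_goals omega

-- pass 2 of B: balance check of the brace token stream
def go2 (depth : Int) : List Char → Bool
  | [] => depth == 0
  | b :: bs =>
    if depth + (if b == '{' then 1 else -1) < 0 then false
    else go2 (depth + (if b == '{' then 1 else -1)) bs

def check_balanced_braces_py_alt (script : String) : Bool :=
  go2 0 (lexLoop script.toList 0 LexMode.code [])

-- ===== PRECONDITION & SPEC =====
def Spec_check_balanced_braces_py (script : String) (out : Bool) : Prop := out = check_balanced_braces_py_alt script
instance (script : String) (out : Bool) : Decidable (Spec_check_balanced_braces_py script out) := by unfold Spec_check_balanced_braces_py; infer_instance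

-- ===== CLAIM (what is proved, stated in full; the proofs are below) =====
def Claim_equal_check_balanced_braces_py : Prop := ∀ (script : String), Dom_check_balanced_braces_py script → Spec_check_balanced_braces_py script (check_balanced_braces_py script)

-- ===== LEMMAS AND PROOFS =====

-- the lexer's accumulator splits off as a prefix
lemma lexLoop_acc (c : List Char) : ∀ k i mode out, c.length - i ≤ k →
    lexLoop c i mode out = out ++ lexLoop c i mode [] := by
  intro k
  induction k with
  | zero =>
    intro i mode out h
    rw [lexLoop]; conv_rhs => rw [lexLoop]
    have hi : ¬ i < c.length := by omega
    simp [hi]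
  | succ k ih =>
    intro i mode out h
    rw [lexLoop]; conv_rhs => rw [lexLoop]
    by_cases hi : i < c.length
    · simp only [hi, dif_pos]
      split_ifs <;>
        first
          | (rw [ih (i+1) _ out (by omega), ih (i+1) _ [] (by omega)])
          | (rw [ih (i+2) _ out (by omega), ih (i+2) _ [] (by omega)])
          | (rw [ih (i+1) _ (out ++ [c.getD i ' ']) (by omega),
                 ih (i+1) _ ([] ++ [c.getD i ' ']) (by omega)]
             simp)
    · simp [hi]

-- mode ↔ flag correspondence: A's loop equals the balance check of B's lexer output
lemma main_inv (c : List Char) : ∀ k i (count : Int) mode, c.length - i ≤ k → 0 ≤ count →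
    aLoop c i count (mode == LexMode.strMode) (mode == LexMode.comment)
      = go2 count (lexLoop c i mode []) := by
  intro k
  induction k with
  | zero =>
    intro i count mode h hc
    rw [aLoop, lexLoop]
    have hi : ¬ i < c.length := by omega
    simp [hi, go2]
  | succ k ih =>
    intro i count mode h hc
    rw [aLoop]; conv_rhs => rw [lexLoop]
    by_cases hi : i < c.length
    · simp only [hi, dif_pos]
      cases mode <;>
      · simp only [show ∀ m n : LexMode, (m == n) = decide (m = n) from fun _ _ => rfl]
        simp only [decide_eq_true_eq, reduceCtorEq, decide_false, decide_true,
                   Bool.not_false, Bool.not_true, Bool.and_true, Bool.and_false,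
                   Bool.true_and, Bool.false_and, eq_self_iff_true]
        split_ifs <;>
          first
            | (exact absurd ‹false = true› (by simp))
            | simpa using ih (i+1) count LexMode.code (by omega) hc
            | simpa using ih (i+1) count LexMode.strMode (by omega) hc
            | simpa using ih (i+1) count LexMode.comment (by omega) hc
            | simpa using ih (i+2) count LexMode.code (by omega) hc
            | simpa using ih (i+2) count LexMode.strMode (by omega) hc
            | simpa using ih (i+2) count LexMode.comment (by omega) hc
            | (rw [lexLoop_acc c (c.length - (i+1)) (i+1) LexMode.code ([] ++ [c.getD i ' ']) (by omega)]
               simp only [List.nil_append, List.singleton_append, go2, Bool.not_eq_true, *,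
                          ite_true, ite_false]
               first
                 | (rw [if_neg (by omega)]
                    simpa using ih (i+1) (count+1) LexMode.code (by omega) (by omega))
                 | (rw [if_pos (by omega)])
                 | (rw [if_neg (by omega), show count + -1 = count - 1 from by ring]
                    simpa using ih (i+1) (count-1) LexMode.code (by omega) (by omega))
                 | simpa using ih (i+1) (count+1) LexMode.code (by omega) (by omega)
                 | (rw [show count + -1 = count - 1 from by ring]
                    simpa using ih (i+1) (count-1) LexMode.code (by omega) (by omega)))
            | (simp_all; done)
            | (simp_all
               rw [lexLoop_acc c (c.length - (i+1)) (i+1) LexMode.code ['}'] (by omega)]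
               simp only [List.singleton_append, go2,
                          show (if (('}' : Char) == '{') = true then (1:Int) else -1) = -1 from rfl]
               first
                 | (rw [if_pos (by omega)])
                 | (rw [if_neg (by omega), show count + -1 = count - 1 from by ring]
                    simpa using ih (i+1) (count-1) LexMode.code (by omega) (by omega))
                 | (rw [show count + -1 = count - 1 from by ring]
                    simpa using ih (i+1) (count-1) LexMode.code (by omega) (by omega)))
    · simp [hi, go2]

-- ===== VERDICT (by name: the statement is the Claim_ definition above) =====
theorem check_balanced_braces_py_spec : Claim_equal_check_balanced_braces_py := by
  intro script _
  unfold Spec_check_balanced_braces_py check_balanced_braces_py check_balanced_braces_py_alt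
  exact main_inv script.toList script.toList.length 0 0 LexMode.code (by omega) (by norm_num)
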